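-- pv_equiv track=rewrite | github.com/Daeh0f/capybara | utils/demo-obfuscation/pseudoloop.py | search_of_OIOO
-- ===== SOURCE A (Python) =====
-- def deep_in(lst, element):
--     for i in lst:
--         if element in i:
--             return True
--     return False
--
-- def search_of_OIOO(ways):   # OIOO - 0_0 ?? look at header
--     list_of_OIOO = set()
--     for path in ways:
--         for node in path:
--             ways_with_node = [way for way in ways if node in way]
--             ways_without_node = [way for way in ways if node not in way]
--             if len(ways_with_node) > 1:
--                 for next_node in path[path.index(node)+1:]:
--                     is_check = True
--                     for way in ways_with_node:
--                         try:
--                             way.index(next_node)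
--                         except:
--                             is_check = False
--                             break
--                     if is_check and not deep_in(ways_without_node, next_node) and node != next_node:
--                         list_of_OIOO.add((node, next_node))
--             else:
--                 for next_node in path[path.index(node)+1:]:
--                     is_check = True
--                     for way in ways_without_node:
--                         try:
--                             way.index(next_node)
--                             is_check = False
--                             break
--                         except:
--                             continue
--                     if is_check and node != next_node:
--                         list_of_OIOO.add((node, next_node))
--     return list_of_OIOO
-- ===== SOURCE B (Python) =====
-- def search_of_OIOO(ways):
--     # node -> set of indices of ways containing it, built once
--     occ = {}
--     for i, way in enumerate(ways):
--         for node in way: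
--             occ.setdefault(node, set()).add(i)
--     result = set()
--     for path in ways:
--         first = {}
--         for j, node in enumerate(path):
--             if node not in first:
--                 first[node] = j
--         for node in path:
--             o = occ[node]
--             for nxt in path[first[node] + 1:]:
--                 if node != nxt and occ[nxt] == o:
--                     result.add((node, nxt))
--     return result
-- ===== Notes on version B (the rewrite author's own statement) =====
-- stated objective: faster
-- what changed: B builds a node->set-of-way-indices dictionary and a first-occurrence-index dictionary once, so each candidate pair is decided by one set-equality check instead of A's per-pair rescans of every way (filter comprehensions, deep_in, try/except .index calls) and per-node path.index scans.
import Mathlib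
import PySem

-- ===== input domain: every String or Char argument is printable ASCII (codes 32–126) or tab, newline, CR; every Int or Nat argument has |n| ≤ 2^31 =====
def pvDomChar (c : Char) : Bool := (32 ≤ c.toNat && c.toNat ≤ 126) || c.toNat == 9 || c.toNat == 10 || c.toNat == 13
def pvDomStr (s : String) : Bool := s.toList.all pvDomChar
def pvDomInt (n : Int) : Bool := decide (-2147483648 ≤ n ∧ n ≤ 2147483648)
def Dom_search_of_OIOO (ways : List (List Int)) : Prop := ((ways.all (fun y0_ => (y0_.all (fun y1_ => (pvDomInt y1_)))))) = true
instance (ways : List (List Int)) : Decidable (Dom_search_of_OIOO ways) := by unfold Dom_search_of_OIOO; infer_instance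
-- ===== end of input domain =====

-- B replaces A's per-pair rescans of all ways (comprehensions + try/index) by a node→{way indices}
-- dictionary built once, so each candidate pair costs one set-equality check (objective: faster).

-- ===== PORT A =====
-- for i in lst: if element in i: return True / return False  (any = this early-exit loop)
def deep_in (lst : List (List Int)) (element : Int) : Bool :=
  lst.any (fun i => i.contains element)

def search_of_OIOO (ways : List (List Int)) : List (Int × Int) :=
  ways.foldl (fun acc path =>
    path.foldl (fun acc node =>
      let ways_with_node := ways.filter (fun way => way.contains node)
      let ways_without_node := ways.filter (fun way => !way.contains node)
      match PySem.List.index? path node with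
      | none => acc  -- unreachable (node comes from path); Python's .index would raise
      | some k =>
        if ways_with_node.length > 1 then
          (PySem.List.slice path (some ((k : Int) + 1)) none).foldl (fun acc next_node =>
            -- is_check: the try/except loop = every way in ways_with_node contains next_node
            let is_check := ways_with_node.all (fun way => (PySem.List.index? way next_node).isSome)
            if is_check && !(deep_in ways_without_node next_node) && !(node == next_node) then
              PySem.Set.add acc (node, next_node)
            else acc) acc
        else
          (PySem.List.slice path (some ((k : Int) + 1)) none).foldl (fun acc next_node =>
            -- is_check: the try/except loop = no way in ways_without_node contains next_node
            let is_check := !(ways_without_node.any (fun way => (PySem.List.index? way next_node).isSome))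
            if is_check && !(node == next_node) then
              PySem.Set.add acc (node, next_node)
            else acc) acc) acc) PySem.Set.empty

-- ===== PORT B =====
def search_of_OIOO_alt (ways : List (List Int)) : List (Int × Int) :=
  -- occ: node -> set of indices of ways containing it (occ.setdefault(node, set()).add(i))
  let occ : PySem.Dict Int (PySem.Set Int) :=
    (PySem.List.enumerate ways).foldl (fun d iw =>
      iw.2.foldl (fun d node => d.modify node PySem.Set.empty (fun s => PySem.Set.add s iw.1)) d)
      PySem.Dict.empty
  ways.foldl (fun res path =>
    -- first: node -> index of its first occurrence in path
    let first : PySem.Dict Int Int :=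
      (PySem.List.enumerate path).foldl (fun d jn =>
        if d.contains jn.2 then d else d.insert jn.2 jn.1) PySem.Dict.empty
    path.foldl (fun res node =>
      let o := occ.getD node PySem.Set.empty    -- occ[node]; key always present (node ∈ path ∈ ways)
      (PySem.List.slice path (some (first.getD node 0 + 1)) none).foldl (fun res nxt =>
        if !(node == nxt) && PySem.Set.equal (occ.getD nxt PySem.Set.empty) o then
          PySem.Set.add res (node, nxt)
        else res) res) res) PySem.Set.empty

-- ===== PRECONDITION & SPEC =====
def Spec_search_of_OIOO (ways : List (List Int)) (out : List (Int × Int)) : Prop := out = search_of_OIOO_alt ways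
instance (ways : List (List Int)) (out : List (Int × Int)) : Decidable (Spec_search_of_OIOO ways out) := by unfold Spec_search_of_OIOO; infer_instance

-- ===== CLAIM (what is proved, stated in full; the proofs are below) =====
def Claim_equal_search_of_OIOO : Prop := ∀ (ways : List (List Int)), Dom_search_of_OIOO ways → Spec_search_of_OIOO ways (search_of_OIOO ways)

-- ===== LEMMAS AND PROOFS =====

-- membership in the per-way inner occ fold
theorem mem_occ_inner (way : List Int) (i : Int) (d : PySem.Dict Int (PySem.Set Int)) (x n : Int) :
    x ∈ (way.foldl (fun d node => d.modify node PySem.Set.empty (fun s => PySem.Set.add s i)) d).getD n PySem.Set.empty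
      ↔ x ∈ d.getD n PySem.Set.empty ∨ (x = i ∧ n ∈ way) := by
  induction way generalizing d with
  | nil => simp
  | cons a w ih =>
    simp only [List.foldl_cons, ih, PySem.Dict.getD_modify, List.mem_cons]
    by_cases h : n = a
    · subst h; simp [PySem.Set.mem_add]; tauto
    · simp [h]

-- membership in the full occ fold
theorem mem_occ (l : List (List Int)) (s : Int) (d : PySem.Dict Int (PySem.Set Int)) (x n : Int) :
    x ∈ ((PySem.List.enumerate l s).foldl (fun d iw =>
          iw.2.foldl (fun d node => d.modify node PySem.Set.empty (fun s => PySem.Set.add s iw.1)) d) d).getD n PySem.Set.empty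
      ↔ x ∈ d.getD n PySem.Set.empty ∨ ∃ k : Nat, ∃ h : k < l.length, x = s + k ∧ n ∈ l[k] := by
  induction l generalizing s d with
  | nil => simp [PySem.List.enumerate_nil]
  | cons w l ih =>
    rw [PySem.List.enumerate_cons, List.foldl_cons]
    rw [ih]
    rw [mem_occ_inner]
    constructor
    · rintro ((h | ⟨hx, hn⟩) | ⟨k, hk, hx, hn⟩)
      · exact Or.inl h
      · exact Or.inr ⟨0, by simp, by simpa using hx, by simpa using hn⟩
      · refine Or.inr ⟨k + 1, by simpa using hk, ?_, by simpa using hn⟩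
        push_cast at hx ⊢; omega
    · rintro (h | ⟨k, hk, hx, hn⟩)
      · exact Or.inl (Or.inl h)
      · cases k with
        | zero => exact Or.inl (Or.inr ⟨by simpa using hx, by simpa using hn⟩)
        | succ k =>
          refine Or.inr ⟨k, by simpa using hk, ?_, by simpa using hn⟩
          push_cast at hx ⊢; omega

-- the occ dictionary of B
def occOf (ways : List (List Int)) : PySem.Dict Int (PySem.Set Int) :=
  (PySem.List.enumerate ways).foldl (fun d iw =>
    iw.2.foldl (fun d node => d.modify node PySem.Set.empty (fun s => PySem.Set.add s iw.1)) d)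
    PySem.Dict.empty

theorem mem_occOf (ways : List (List Int)) (x n : Int) :
    x ∈ (occOf ways).getD n PySem.Set.empty ↔ ∃ k : Nat, ∃ h : k < ways.length, x = k ∧ n ∈ ways[k] := by
  unfold occOf
  rw [mem_occ]
  have h0 : (PySem.Dict.empty : PySem.Dict Int (PySem.Set Int)).getD n PySem.Set.empty = [] := rfl
  rw [h0]
  simp

-- Set.equal on occ entries says: a and b occur in exactly the same ways
theorem equal_occOf (ways : List (List Int)) (a b : Int) :
    PySem.Set.equal ((occOf ways).getD a PySem.Set.empty) ((occOf ways).getD b PySem.Set.empty) = true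
      ↔ ∀ way ∈ ways, (a ∈ way ↔ b ∈ way) := by
  rw [PySem.Set.equal_iff]
  constructor
  · intro h way hway
    obtain ⟨k, hk, hkw⟩ := List.mem_iff_getElem.mp hway
    subst hkw
    constructor
    · intro ha
      have := (h k).mp ((mem_occOf ways k a).mpr ⟨k, hk, rfl, ha⟩)
      obtain ⟨k', hk', hkk', hb⟩ := (mem_occOf ways k b).mp this
      have : k' = k := by exact_mod_cast hkk'.symm
      subst this; exact hb
    · intro hb
      have := (h k).mpr ((mem_occOf ways k b).mpr ⟨k, hk, rfl, hb⟩)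
      obtain ⟨k', hk', hkk', ha⟩ := (mem_occOf ways k a).mp this
      have : k' = k := by exact_mod_cast hkk'.symm
      subst this; exact ha
  · intro h x
    rw [mem_occOf, mem_occOf]
    constructor
    · rintro ⟨k, hk, hx, ha⟩
      exact ⟨k, hk, hx, (h _ (ways.getElem_mem hk)).mp ha⟩
    · rintro ⟨k, hk, hx, hb⟩
      exact ⟨k, hk, hx, (h _ (ways.getElem_mem hk)).mpr hb⟩

-- the "first occurrence" dictionary of B
def firstOf (path : List Int) : PySem.Dict Int Int :=
  (PySem.List.enumerate path).foldl (fun d jn =>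
    if d.contains jn.2 then d else d.insert jn.2 jn.1) PySem.Dict.empty

theorem first_fold_contained (l : List Int) (s : Int) (d : PySem.Dict Int Int) (n : Int)
    (h : d.contains n = true) :
    ((PySem.List.enumerate l s).foldl (fun d jn =>
      if d.contains jn.2 then d else d.insert jn.2 jn.1) d).getD n 0 = d.getD n 0 := by
  induction l generalizing s d with
  | nil => simp [PySem.List.enumerate_nil]
  | cons a l ih =>
    rw [PySem.List.enumerate_cons, List.foldl_cons]
    by_cases ha : d.contains a = true
    · simp only [ha, if_true]; exact ih _ _ h
    · simp only [ha, Bool.false_eq_true, if_false]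
      have hna : n ≠ a := fun e => ha (e ▸ h)
      rw [ih (s + 1) _ (by simp [PySem.Dict.contains_insert, h])]
      exact PySem.Dict.getD_insert_of_ne d _ _ hna

theorem first_fold_getD (l : List Int) (s : Int) (d : PySem.Dict Int Int) (n : Int)
    (hn : n ∈ l) (h : d.contains n = false) :
    ((PySem.List.enumerate l s).foldl (fun d jn =>
      if d.contains jn.2 then d else d.insert jn.2 jn.1) d).getD n 0 = s + l.idxOf n := by
  induction l generalizing s d with
  | nil => simp at hn
  | cons a l ih =>
    rw [PySem.List.enumerate_cons, List.foldl_cons]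
    by_cases hna : n = a
    · subst hna
      simp only [h, Bool.false_eq_true, if_false, List.idxOf_cons_self]
      rw [first_fold_contained _ _ _ _ (by simp)]
      simp [PySem.Dict.getD_insert_self]
    · have hn' : n ∈ l := by
        rcases List.mem_cons.mp hn with h' | h'
        · exact absurd h' hna
        · exact h'
      have hidx : (a :: l).idxOf n = l.idxOf n + 1 := List.idxOf_cons_ne l (by simpa using (Ne.symm hna))
      by_cases ha : d.contains a = true
      · simp only [ha, if_true]
        rw [ih (s + 1) d hn' h, hidx]; push_cast; ring
      · simp only [ha, Bool.false_eq_true, if_false]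
        rw [ih (s + 1) _ hn' (by simp [PySem.Dict.contains_insert, h, hna]), hidx]
        push_cast; ring

theorem firstOf_getD (path : List Int) (n : Int) (hn : n ∈ path) :
    (firstOf path).getD n 0 = path.idxOf n := by
  unfold firstOf
  rw [first_fold_getD path 0 _ n hn (by simp [PySem.Dict.empty, PySem.Dict.contains])]
  simp

-- a list of length ≤ 1 has at most one member
theorem eq_of_len_le_one {α : Type} {l : List α} (h : l.length ≤ 1) {a b : α}
    (ha : a ∈ l) (hb : b ∈ l) : a = b := by
  cases l with
  | nil => simp at ha
  | cons x t =>
    cases t with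
    | nil => simp at ha hb; rw [ha, hb]
    | cons y t => simp at h

-- condition equality: A's branchy rescan condition = B's set-equality condition
theorem idxOf?_mem (l : List Int) (n : Int) (h : n ∈ l) : List.idxOf? n l = some (List.idxOf n l) := by
  induction l with
  | nil => simp at h
  | cons a t ih =>
    by_cases e : n = a
    · subst e; simp [List.idxOf?_cons, List.idxOf_cons_self]
    · rw [List.idxOf?_cons, List.idxOf_cons_ne t (show a ≠ n from fun x => e x.symm)]
      simp only [beq_iff_eq]
      rw [if_neg (by exact fun x => e x.symm)]
      rw [ih (by rcases List.mem_cons.mp h with h'|h'; exact absurd h' e; exact h')]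
      rfl

-- condition equality: A's branchy rescan condition = B's set-equality condition
theorem cond_eq (ways : List (List Int)) (path : List Int) (node nxt : Int)
    (hpath : path ∈ ways) (hnode : node ∈ path) (hnxt : nxt ∈ path) :
    (if ((ways.filter (fun way => way.contains node)).length > 1) then
       ((ways.filter (fun way => way.contains node)).all (fun way => (PySem.List.index? way nxt).isSome)
        && !(deep_in (ways.filter (fun way => !way.contains node)) nxt) && !(node == nxt))
     else
       (!((ways.filter (fun way => !way.contains node)).any (fun way => (PySem.List.index? way nxt).isSome))
        && !(node == nxt)))
    = (!(node == nxt) && PySem.Set.equal ((occOf ways).getD nxt PySem.Set.empty) ((occOf ways).getD node PySem.Set.empty)) := by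
  rw [Bool.eq_iff_iff, Bool.and_eq_true, equal_occOf]
  by_cases hlen : ((ways.filter (fun way => way.contains node)).length > 1)
  · simp only [hlen, if_true, Bool.and_eq_true, Bool.not_eq_true', List.all_eq_true,
      List.any_eq_false, List.mem_filter, PySem.List.index?_isSome_iff, deep_in,
      List.contains_iff_mem, beq_eq_false_iff_ne, ne_eq]
    constructor
    · rintro ⟨⟨hall, hnone⟩, hne⟩
      refine ⟨by simpa using hne, fun way hway => ⟨fun ha => ?_, fun hb => hall way ⟨hway, by simpa using hb⟩⟩⟩
      by_contra hb
      exact (hnone way ⟨hway, by simpa using hb⟩) ha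
    · rintro ⟨hne, hiff⟩
      exact ⟨⟨fun way ⟨hway, hb⟩ => (hiff way hway).mpr (by simpa using hb),
              fun way ⟨hway, hb⟩ ha => (by simpa using hb : node ∉ way) ((hiff way hway).mp ha)⟩,
             by simpa using hne⟩
  · simp only [hlen, if_false, Bool.and_eq_true, Bool.not_eq_true', List.any_eq_false,
      List.mem_filter, PySem.List.index?_isSome_iff, beq_eq_false_iff_ne, ne_eq]
    have hlen' : (ways.filter (fun way => way.contains node)).length ≤ 1 := by omega
    constructor
    · rintro ⟨hnone, hne⟩
      refine ⟨by simpa using hne, fun way hway => ⟨fun ha => ?_, fun hb => ?_⟩⟩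
      · by_contra hb
        exact (by simpa using hnone way ⟨hway, by simpa using hb⟩ : nxt ∉ way) ha
      · have hwmem : way ∈ ways.filter (fun w => w.contains node) :=
          List.mem_filter.mpr ⟨hway, by simpa using hb⟩
        have hpmem : path ∈ ways.filter (fun w => w.contains node) :=
          List.mem_filter.mpr ⟨hpath, by simpa using hnode⟩
        have := eq_of_len_le_one hlen' hwmem hpmem
        subst this; exact hnxt
    · rintro ⟨hne, hiff⟩
      refine ⟨fun way ⟨hway, hb⟩ => ?_, by simpa using hne⟩
      intro ha
      exact (by simpa using hb : node ∉ way) ((hiff way hway).mp ha)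

-- ===== VERDICT (by name: the statement is the Claim_ definition above) =====
theorem search_of_OIOO_spec : Claim_equal_search_of_OIOO := by
  intro ways _
  unfold Spec_search_of_OIOO search_of_OIOO search_of_OIOO_alt
  rw [show (PySem.List.enumerate ways).foldl (fun d iw =>
      iw.2.foldl (fun d node => d.modify node PySem.Set.empty (fun s => PySem.Set.add s iw.1)) d)
      PySem.Dict.empty = occOf ways from rfl]
  apply PySem.List.foldl_congr_mem
  intro acc path hpath
  rw [show ((PySem.List.enumerate path).foldl (fun d jn =>
      if d.contains jn.2 then d else d.insert jn.2 jn.1) PySem.Dict.empty) = firstOf path from rfl]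
  apply PySem.List.foldl_congr_mem
  intro acc node hnode
  have hidx : PySem.List.index? path node = some (path.idxOf node) := by
    rw [PySem.List.index?_eq_idxOf?]
    exact idxOf?_mem path node hnode
  rw [hidx]
  rw [firstOf_getD path node hnode]
  simp only []
  -- both sides fold over the same slice; merge A's branch into the fold body and compare
  have hslice : ∀ nxt, nxt ∈ PySem.List.slice path (some ((path.idxOf node : Int) + 1)) none → nxt ∈ path :=
    fun nxt h => PySem.List.mem_of_mem_slice path _ _ h
  by_cases hlen : ((ways.filter (fun way => way.contains node)).length > 1)
  · simp only [hlen, if_true]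
    apply PySem.List.foldl_congr_mem
    intro acc nxt hnxt
    have := cond_eq ways path node nxt hpath hnode (hslice nxt hnxt)
    simp only [hlen, if_true] at this
    rw [this]
  · simp only [hlen, if_false]
    apply PySem.List.foldl_congr_mem
    intro acc nxt hnxt
    have := cond_eq ways path node nxt hpath hnode (hslice nxt hnxt)
    simp only [hlen, if_false] at this
    rw [this]
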